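-- pv_equiv track=rewrite | github.com/chenyufei/Python | data_analysis/001.py | get_item_for_text
-- ===== SOURCE A (Python) =====
-- def get_item_for_text(text,items):
--     for item in items:
--         c = item
--         for char in text:
--             if char not in c:
--                 break
--             else:
--                 c = c.replace(char, "")
--         if not c:
--             return item
--     return ""
-- ===== SOURCE B (Python) =====
-- def get_item_for_text(text, items):
--     for item in items:
--         d = set(item)
--         k = len(d)
--         prefix = text[:k]
--         if len(prefix) == k and set(prefix) == d:
--             return item
--     return ""
-- ===== Notes on version B (the rewrite author's own statement) =====
-- stated objective: simpler
-- what changed: Replaces A's inner char-by-char replace/break consumption loop with a single check that the first len(set(item)) characters of text are exactly a permutation of item's distinct characters (prefix length + set equality).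
import Mathlib
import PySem

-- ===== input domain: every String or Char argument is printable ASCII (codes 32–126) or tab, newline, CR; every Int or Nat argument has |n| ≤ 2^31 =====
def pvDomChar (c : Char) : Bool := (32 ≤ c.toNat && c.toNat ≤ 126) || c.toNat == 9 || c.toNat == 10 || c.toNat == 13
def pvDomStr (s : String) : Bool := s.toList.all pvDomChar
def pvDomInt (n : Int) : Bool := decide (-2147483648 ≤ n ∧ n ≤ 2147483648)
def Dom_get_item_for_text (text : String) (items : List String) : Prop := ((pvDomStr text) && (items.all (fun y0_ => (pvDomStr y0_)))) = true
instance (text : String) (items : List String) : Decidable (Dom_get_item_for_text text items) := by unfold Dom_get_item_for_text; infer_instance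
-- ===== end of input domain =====

-- B replaces A's char-by-char replace/break consumption loop by a prefix-slice
-- length + set-equality check (simpler; same observable behaviour, no mutation).

-- ===== PORT A =====
-- inner loop 'for char in text: if char not in c: break; else: c = c.replace(char, "")'
-- ('char in c' for a single char is element membership; c.replace(char, "") removes
--  every occurrence of char — exact as filter (· ≠ char)); returns the final c
def pvConsumeA : List Char → List Char → List Char
  | [], c => c
  | ch :: rest, c => if ch ∈ c then pvConsumeA rest (c.filter (fun x => !(x == ch))) else c

-- outer loop 'for item in items: … if not c: return item' / 'return ""'
def pvLoopA (text : List Char) : List String → String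
  | [] => ""
  | item :: rest =>
      if (pvConsumeA text item.toList).isEmpty then item else pvLoopA text rest

def get_item_for_text (text : String) (items : List String) : String :=
  pvLoopA text.toList items

-- ===== PORT B =====
-- 'd = set(item); k = len(d); prefix = text[:k]; if len(prefix) == k and set(prefix) == d: return item'
def pvLoopB (text : List Char) : List String → String
  | [] => ""
  | item :: rest =>
      let d : PySem.Set Char := PySem.Set.ofList item.toList
      let k : Nat := d.length
      let pre : List Char := PySem.List.slice text none (some (k : Int))
      if pre.length == k && PySem.Set.equal (PySem.Set.ofList pre) d then item
      else pvLoopB text rest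

def get_item_for_text_alt (text : String) (items : List String) : String :=
  pvLoopB text.toList items

-- ===== PRECONDITION & SPEC =====
def Spec_get_item_for_text (text : String) (items : List String) (out : String) : Prop := out = get_item_for_text_alt text items
instance (text : String) (items : List String) (out : String) : Decidable (Spec_get_item_for_text text items out) := by unfold Spec_get_item_for_text; infer_instance

-- ===== CLAIM (what is proved, stated in full; the proofs are below) =====
def Claim_equal_get_item_for_text : Prop := ∀ (text : String) (items : List String), Dom_get_item_for_text text items → Spec_get_item_for_text text items (get_item_for_text text items)

-- ===== LEMMAS AND PROOFS =====

-- len(set(c)) is the number of distinct characters of c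
theorem pv_ofList_length (c : List Char) :
    (PySem.Set.ofList c).length = c.toFinset.card := by
  have hnd : (PySem.Set.ofList c).Nodup := PySem.Set.nodup_ofList c
  have hfin : (PySem.Set.ofList c).toFinset = c.toFinset := by
    ext x
    simp [List.mem_toFinset, PySem.Set.mem_ofList]
  calc (PySem.Set.ofList c).length
      = (PySem.Set.ofList c).toFinset.card := (List.toFinset_card_of_nodup hnd).symm
    _ = c.toFinset.card := by rw [hfin]

theorem pv_filter_toFinset (c : List Char) (t : Char) :
    (c.filter (fun x => !(x == t))).toFinset = c.toFinset.erase t := by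
  ext x
  simp [Finset.mem_erase]
  tauto

-- A's consumption loop empties c exactly when the first (number of distinct chars
-- of c) characters of ts have that length and the same character set as c.
theorem pv_consume_iff (ts : List Char) : ∀ c : List Char,
    (pvConsumeA ts c = [] ↔
      ((ts.take c.toFinset.card).length = c.toFinset.card ∧
        ∀ x, x ∈ ts.take c.toFinset.card ↔ x ∈ c)) := by
  induction ts with
  | nil =>
      intro c
      constructor
      · intro h; subst h; simp
      · rintro ⟨h1, h2⟩
        simp only [pvConsumeA]
        cases hc : c with
        | nil => rfl
        | cons y ys =>
            exfalso
            have hy : y ∈ c := by rw [hc]; exact List.mem_cons_self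
            have := (h2 y).mpr hy
            simp at this
  | cons t ts' ih =>
      intro c
      by_cases hc : t ∈ c
      · -- char consumed: recurse on c with all copies of t removed
        have hkpos : 0 < c.toFinset.card :=
          Finset.card_pos.mpr ⟨t, List.mem_toFinset.mpr hc⟩
        have hc' : (c.filter (fun x => !(x == t))).toFinset.card = c.toFinset.card - 1 := by
          rw [pv_filter_toFinset, Finset.card_erase_of_mem (List.mem_toFinset.mpr hc)]
        have htake : (t :: ts').take c.toFinset.card
            = t :: ts'.take (c.toFinset.card - 1) := by
          cases hk : c.toFinset.card with
          | zero => omega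
          | succ m => simp [List.take_succ_cons]
        have hstep : pvConsumeA (t :: ts') c
            = pvConsumeA ts' (c.filter (fun x => !(x == t))) := by
          simp [pvConsumeA, hc]
        rw [hstep, ih, hc', htake]
        set k := c.toFinset.card with hkdef
        set P' := ts'.take (k - 1) with hP
        constructor
        · rintro ⟨h1, h2⟩
          refine ⟨by simp [h1]; omega, ?_⟩
          intro x
          constructor
          · intro hx
            rcases List.mem_cons.mp hx with rfl | hx'
            · exact hc
            · have := (h2 x).mp hx'
              simp [List.mem_filter] at this
              exact this.1
          · intro hx
            by_cases hxt : x = t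
            · subst hxt; exact List.mem_cons_self
            · refine List.mem_cons_of_mem _ ((h2 x).mpr ?_)
              simp [List.mem_filter, hx, hxt]
        · rintro ⟨h1, h2⟩
          have hlen : P'.length = k - 1 := by
            simp at h1; omega
          -- t cannot occur in P': otherwise P' (length k-1) would cover all k distinct chars of c
          have htP : t ∉ P' := by
            intro htP
            have hsub : c.toFinset ⊆ P'.toFinset := by
              intro x hx
              have hxc : x ∈ c := List.mem_toFinset.mp hx
              rcases List.mem_cons.mp ((h2 x).mpr hxc) with rfl | hx'
              · exact List.mem_toFinset.mpr htP
              · exact List.mem_toFinset.mpr hx'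
            have h3 : k ≤ P'.toFinset.card := Finset.card_le_card hsub
            have h4 : P'.toFinset.card ≤ P'.length := P'.toFinset_card_le
            omega
          refine ⟨hlen, ?_⟩
          intro x
          constructor
          · intro hx
            have hxc : x ∈ c := (h2 x).mp (List.mem_cons_of_mem _ hx)
            have hxt : x ≠ t := by rintro rfl; exact htP hx
            simp [List.mem_filter, hxc, hxt]
          · intro hx
            simp [List.mem_filter] at hx
            rcases List.mem_cons.mp ((h2 x).mpr hx.1) with rfl | hx'
            · exact absurd rfl hx.2
            · exact hx'
      · -- char not in c: break; loop result is c itself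
        have hstep : pvConsumeA (t :: ts') c = c := by simp [pvConsumeA, hc]
        rw [hstep]
        constructor
        · intro h; subst h; simp
        · rintro ⟨h1, h2⟩
          cases hcc : c with
          | nil => rfl
          | cons y ys =>
              exfalso
              have hkpos : 0 < c.toFinset.card := by
                refine Finset.card_pos.mpr ⟨y, List.mem_toFinset.mpr ?_⟩
                rw [hcc]; exact List.mem_cons_self
              have htake : t ∈ (t :: ts').take c.toFinset.card := by
                cases hk : c.toFinset.card with
                | zero => omega
                | succ m => simp [List.take_succ_cons]
              exact hc ((h2 t).mp htake)

-- the per-item tests of the two loops agree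
theorem pv_item_test (text c : List Char) :
    (pvConsumeA text c).isEmpty =
      ((PySem.List.slice text none (some ((PySem.Set.ofList c).length : Int))).length
          == (PySem.Set.ofList c).length
        && PySem.Set.equal
            (PySem.Set.ofList (PySem.List.slice text none (some ((PySem.Set.ofList c).length : Int))))
            (PySem.Set.ofList c)) := by
  rw [PySem.List.slice_to_natCast, pv_ofList_length]
  rw [Bool.eq_iff_iff, List.isEmpty_iff, pv_consume_iff, Bool.and_eq_true]
  constructor
  · rintro ⟨h1, h2⟩
    refine ⟨by simp [h1], ?_⟩
    rw [PySem.Set.equal_iff]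
    intro x
    simpa [PySem.Set.mem_ofList] using h2 x
  · rintro ⟨h1, h2⟩
    have h2' := (PySem.Set.equal_iff (s := PySem.Set.ofList (List.take _ text)) (t := PySem.Set.ofList c)).mp h2
    refine ⟨by simpa using h1, fun x => ?_⟩
    simpa [PySem.Set.mem_ofList] using h2' x

theorem pv_loops_eq (text : List Char) (items : List String) :
    pvLoopA text items = pvLoopB text items := by
  induction items with
  | nil => rfl
  | cons item rest ih =>
      simp only [pvLoopA, pvLoopB, pv_item_test text item.toList, ih]

-- ===== VERDICT (by name: the statement is the Claim_ definition above) =====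
theorem get_item_for_text_spec : Claim_equal_get_item_for_text := by
  intro text items _
  show get_item_for_text text items = get_item_for_text_alt text items
  unfold get_item_for_text get_item_for_text_alt
  exact pv_loops_eq text.toList items
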